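-- pv_equiv track=rewrite | github.com/chuigda/Kits | idcount.py | NoText
-- ===== SOURCE A (Python) =====
-- def NoText(string) :
--     strList = string.split("\"");
--     ret = "";
--     i = 0;
--     for section in strList :
--         if (i % 2) == 0 :
--             ret += section
--         i = i + 1
--     return ret
-- ===== SOURCE B (Python) =====
-- def NoText(string):
--     inside = False
--     out = []
--     for ch in string:
--         if ch == '"':
--             inside = not inside
--         elif not inside:
--             out.append(ch)
--     return "".join(out)
-- ===== Notes on version B (the rewrite author's own statement) =====
-- stated objective: idiomatic
-- what changed: Replaced split-on-quote-then-concatenate-even-index-sections with a single-pass state machine that tracks quote parity with a boolean and collects characters outside quotes.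
import Mathlib
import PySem

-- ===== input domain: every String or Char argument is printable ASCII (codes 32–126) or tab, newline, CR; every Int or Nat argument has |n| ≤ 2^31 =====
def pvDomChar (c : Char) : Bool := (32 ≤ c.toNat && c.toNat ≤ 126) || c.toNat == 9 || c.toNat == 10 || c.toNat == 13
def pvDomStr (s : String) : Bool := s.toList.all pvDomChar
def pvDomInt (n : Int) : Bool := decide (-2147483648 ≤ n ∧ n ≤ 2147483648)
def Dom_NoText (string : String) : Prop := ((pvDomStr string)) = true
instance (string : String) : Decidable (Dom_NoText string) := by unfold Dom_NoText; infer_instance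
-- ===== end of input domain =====

-- B replaces split-then-keep-even-index-sections with a single-pass quote-parity state machine (idiomatic; same cost).

-- ===== PORT A =====
def NoText (string : String) : String :=
  -- strList = string.split('"'); sep is non-empty, so split? is always some
  (((PySem.Str.split? string "\"").getD []).foldl (fun (p : String × Int) sec =>
      (if p.2 % 2 == 0 then p.1 ++ sec else p.1, p.2 + 1)) ("", 0)).1

-- ===== PORT B =====
def NoText_alt (string : String) : String :=
  String.ofList (string.toList.foldl (fun (p : List Char × Bool) ch =>
      if ch == '"' then (p.1, !p.2)
      else if p.2 then p
      else (p.1 ++ [ch], p.2)) ([], false)).1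

-- ===== PRECONDITION & SPEC =====
def Spec_NoText (string : String) (out : String) : Prop := out = NoText_alt string
instance (string : String) (out : String) : Decidable (Spec_NoText string out) := by unfold Spec_NoText; infer_instance

-- ===== CLAIM (what is proved, stated in full; the proofs are below) =====
def Claim_equal_NoText : Prop := ∀ (string : String), Dom_NoText string → Spec_NoText string (NoText string)

-- ===== LEMMAS AND PROOFS =====

/-- Reference recursion for splitting on a single quote character. -/
def pvSplit (pre : List Char) : List Char → List (List Char)
  | [] => [pre]
  | c :: rest => if c = '"' then pre :: pvSplit [] rest else pvSplit (pre ++ [c]) rest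

/-- Concatenation of even-indexed sections. -/
def pvEvenCat : List (List Char) → Nat → List Char
  | [], _ => []
  | s :: rest, n => (if n % 2 = 0 then s else []) ++ pvEvenCat rest (n + 1)

/-- B's state machine as a recursion. -/
def pvScan : List Char → Bool → List Char
  | [], _ => []
  | c :: rest, inside =>
      if c = '"' then pvScan rest (!inside)
      else if inside then pvScan rest inside
      else c :: pvScan rest inside

theorem pvGo_eq (fuel : Nat) : ∀ (l cur : List Char) (acc : List (List Char)),
    l.length ≤ fuel →
    PySem.Chars.splitOn.go ['"'] fuel l cur acc = acc.reverse ++ pvSplit cur.reverse l := by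
  induction fuel with
  | zero =>
      intro l cur acc h
      have hl : l = [] := by cases l <;> simp_all
      subst hl
      simp [PySem.Chars.splitOn.go, pvSplit]
  | succ fuel ih =>
      intro l cur acc h
      cases l with
      | nil => simp [PySem.Chars.splitOn.go, pvSplit]
      | cons c rest =>
          by_cases hc : c = '"'
          · subst hc
            have h1 : PySem.Chars.splitOn.go ['"'] (fuel + 1) ('"' :: rest) cur acc
                = PySem.Chars.splitOn.go ['"'] fuel rest [] (cur.reverse :: acc) := by
              simp [PySem.Chars.splitOn.go, List.isPrefixOf]
            have h2 : pvSplit cur.reverse ('"' :: rest) = cur.reverse :: pvSplit [] rest := by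
              simp [pvSplit]
            rw [h1, ih rest [] (cur.reverse :: acc) (by simpa using Nat.le_of_succ_le_succ h), h2]
            simp
          · have h1 : PySem.Chars.splitOn.go ['"'] (fuel + 1) (c :: rest) cur acc
                = PySem.Chars.splitOn.go ['"'] fuel rest (c :: cur) acc := by
              simp [PySem.Chars.splitOn.go, List.isPrefixOf]
              intro h'
              exact absurd h'.symm hc
            have h2 : pvSplit cur.reverse (c :: rest) = pvSplit (cur.reverse ++ [c]) rest := by
              simp [pvSplit, hc]
            rw [h1, ih rest (c :: cur) acc (by simpa using Nat.le_of_succ_le_succ h), h2]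
            simp
  
theorem pvSplitOn_eq (cs : List Char) :
    PySem.Chars.splitOn cs ['"'] = pvSplit [] cs := by
  have := pvGo_eq (cs.length + 1) cs [] [] (Nat.le_succ _)
  simpa [PySem.Chars.splitOn] using this

theorem pvFoldA_eq (parts : List (List Char)) : ∀ (ret : List Char) (n : Nat),
    ((parts.map String.ofList).foldl (fun (p : String × Int) sec =>
      (if p.2 % 2 == 0 then p.1 ++ sec else p.1, p.2 + 1)) (String.ofList ret, (n : Int))).1
    = String.ofList (ret ++ pvEvenCat parts n) := by
  induction parts with
  | nil => intro ret n; simp [pvEvenCat]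
  | cons s rest ih =>
      intro ret n
      have hsucc : ((n : Int) + 1) = ((n + 1 : Nat) : Int) := by push_cast; ring
      rw [List.map_cons, List.foldl_cons]
      by_cases h : n % 2 = 0
      · have hc : ((n : Int) % 2 == 0) = true := by simp; omega
        rw [show pvEvenCat (s :: rest) n = s ++ pvEvenCat rest (n + 1) by simp [pvEvenCat, h]]
        simp only [hc, if_true, ← String.ofList_append, hsucc, ih]
        simp
      · have hc : ((n : Int) % 2 == 0) = false := by simp; omega
        rw [show pvEvenCat (s :: rest) n = pvEvenCat rest (n + 1) by simp [pvEvenCat, h]]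
        simp only [hc, Bool.false_eq_true, if_false, hsucc, ih]

theorem pvEvenCat_split (cs : List Char) : ∀ (pre : List Char) (n : Nat),
    pvEvenCat (pvSplit pre cs) n = (if n % 2 = 0 then pre else []) ++ pvScan cs (n % 2 == 1) := by
  induction cs with
  | nil => intro pre n; simp [pvSplit, pvEvenCat, pvScan]
  | cons c rest ih =>
      intro pre n
      by_cases hc : c = '"'
      · subst hc
        have hflip : ((n + 1) % 2 == 1) = !(n % 2 == 1) := by
          by_cases h : n % 2 = 0 <;> simp_all <;> omega
        rw [show pvSplit pre ('"' :: rest) = pre :: pvSplit [] rest by simp [pvSplit]]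
        rw [show pvEvenCat (pre :: pvSplit [] rest) n
              = (if n % 2 = 0 then pre else []) ++ pvEvenCat (pvSplit [] rest) (n + 1) from rfl]
        rw [ih [] (n + 1), hflip]
        rw [show pvScan ('"' :: rest) (n % 2 == 1) = pvScan rest (!(n % 2 == 1)) by simp [pvScan]]
        simp
      · have hb : (n % 2 == 1) = false ↔ n % 2 = 0 := by
          simp only [beq_eq_false_iff_ne, ne_eq]
          omega
        rw [show pvSplit pre (c :: rest) = pvSplit (pre ++ [c]) rest by simp [pvSplit, hc]]
        rw [ih (pre ++ [c]) n]
        by_cases h : n % 2 = 0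
        · have : (n % 2 == 1) = false := hb.mpr h
          rw [this]
          simp [pvScan, hc, h]
        · have : (n % 2 == 1) = true := by
            rcases Bool.eq_false_or_eq_true (n % 2 == 1) with h' | h'
            · exact h'
            · exact absurd (hb.mp h') h
          rw [this]
          simp [pvScan, hc, h]

theorem pvFoldB_eq (cs : List Char) : ∀ (acc : List Char) (inside : Bool),
    (cs.foldl (fun (p : List Char × Bool) ch =>
      if ch == '"' then (p.1, !p.2)
      else if p.2 then p
      else (p.1 ++ [ch], p.2)) (acc, inside)).1 = acc ++ pvScan cs inside := by
  induction cs with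
  | nil => intro acc inside; simp [pvScan]
  | cons c rest ih =>
      intro acc inside
      rw [List.foldl_cons]
      by_cases hc : c = '"'
      · subst hc
        rw [show ((if ('"' == '"') then ((acc, inside).1, !(acc, inside).2)
              else if (acc, inside).2 then (acc, inside) else ((acc, inside).1 ++ ['"'], (acc, inside).2)) : List Char × Bool)
              = (acc, !inside) by simp]
        rw [ih acc (!inside)]
        simp [pvScan]
      · cases inside with
        | true =>
            rw [show ((if (c == '"') then ((acc, true).1, !(acc, true).2)
                  else if (acc, true).2 then (acc, true) else ((acc, true).1 ++ [c], (acc, true).2)) : List Char × Bool)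
                  = (acc, true) by simp [hc]]
            rw [ih acc true]
            simp [pvScan, hc]
        | false =>
            rw [show ((if (c == '"') then ((acc, false).1, !(acc, false).2)
                  else if (acc, false).2 then (acc, false) else ((acc, false).1 ++ [c], (acc, false).2)) : List Char × Bool)
                  = (acc ++ [c], false) by simp [hc]]
            rw [ih (acc ++ [c]) false]
            simp [pvScan, hc]

theorem pvSplitQ (s : String) :
    (PySem.Str.split? s "\"").getD [] = (PySem.Chars.splitOn s.toList ['"']).map String.ofList := by
  simp [PySem.Str.split?, PySem.Chars.split?]

theorem pvFoldA_eq0 (parts : List (List Char)) :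
    ((parts.map String.ofList).foldl (fun (p : String × Int) sec =>
      (if p.2 % 2 == 0 then p.1 ++ sec else p.1, p.2 + 1)) ("", 0)).1
    = String.ofList (pvEvenCat parts 0) := by
  have := pvFoldA_eq parts [] 0
  simpa using this

-- ===== VERDICT (by name: the statement is the Claim_ definition above) =====
theorem NoText_spec : Claim_equal_NoText := by
  intro s _
  unfold Spec_NoText NoText NoText_alt
  rw [pvSplitQ, pvSplitOn_eq, pvFoldA_eq0, pvFoldB_eq]
  have h := pvEvenCat_split s.toList [] 0
  simp only [h]
  simp
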